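-- pv_equiv track=rewrite | github.com/slovb/advent_of_code_2019 | 04/second.py | hasProperDouble
-- ===== SOURCE A (Python) =====
-- def hasProperDouble(n):
--     m = n % 10
--     n //= 10
--     inTripple = False
--     while n > 0:
--         if m == n % 10:
--             if n < 10 and not inTripple:  # at the end
--                 return True
--             elif m == (n // 10) % 10:  # even next digit
--                 inTripple = True
--             elif not inTripple:
--                 return True
--         elif inTripple:
--             inTripple = False
--         m = n % 10
--         n //= 10
--     return False
-- ===== SOURCE B (Python) =====
-- def hasProperDouble(n):
--     prev = None
--     run = 0
--     found = False
--     for c in str(n):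
--         if c == prev:
--             run += 1
--         else:
--             found = found or run == 2
--             prev, run = c, 1
--     return found or run == 2
-- ===== Notes on version B (the rewrite author's own statement) =====
-- stated objective: simpler
-- what changed: B makes a single left-to-right pass over str(n) tracking the current run length and whether any finished run had length exactly two, instead of A's right-to-left modular-arithmetic state machine with an inTripple flag and early returns.
-- outside the precondition, e.g. on hasProperDouble(-22): A returns False, B returns True
import Mathlib
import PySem

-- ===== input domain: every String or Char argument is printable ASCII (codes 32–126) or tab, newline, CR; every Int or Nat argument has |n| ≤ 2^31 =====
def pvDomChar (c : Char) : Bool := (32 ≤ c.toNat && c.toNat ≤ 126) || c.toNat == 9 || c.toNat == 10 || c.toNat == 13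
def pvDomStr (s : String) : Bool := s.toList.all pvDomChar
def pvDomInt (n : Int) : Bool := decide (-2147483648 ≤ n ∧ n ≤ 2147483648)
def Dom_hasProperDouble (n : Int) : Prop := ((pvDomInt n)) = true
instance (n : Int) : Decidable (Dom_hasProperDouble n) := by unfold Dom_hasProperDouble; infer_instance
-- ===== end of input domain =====

-- B replaces A's right-to-left modular-arithmetic state machine (inTripple flag, early
-- returns) by one left-to-right run-length scan over str(n); same values for all n ≥ 0.


-- ===== PORT A =====
-- termination helper for the while loop (n //= 10 strictly shrinks a positive n)
theorem pv_fdiv10_lt (n : Int) (h : 0 < n) : (Int.fdiv n 10).toNat < n.toNat := by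
  have hq : Int.fdiv n 10 = n / 10 := by rw [Int.fdiv_eq_ediv]; simp
  rw [hq]; omega

def hasPDLoop (m n : Int) (inTripple : Bool) : Bool :=
  if h : 0 < n then
    if m == PySem.Int.mod n 10 then
      if decide (n < 10) && !inTripple then true  -- at the end
      else if m == PySem.Int.mod (PySem.Int.floordiv n 10) 10 then  -- even next digit
        hasPDLoop (PySem.Int.mod n 10) (PySem.Int.floordiv n 10) true
      else if !inTripple then true
      else hasPDLoop (PySem.Int.mod n 10) (PySem.Int.floordiv n 10) inTripple
    else hasPDLoop (PySem.Int.mod n 10) (PySem.Int.floordiv n 10) (if inTripple then false else inTripple)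
  else false
termination_by n.toNat
decreasing_by all_goals exact pv_fdiv10_lt n h

def hasProperDouble (n : Int) : Bool :=
  hasPDLoop (PySem.Int.mod n 10) (PySem.Int.floordiv n 10) false

-- ===== PORT B =====
def altLoop (cs : List Char) (prev : Option Char) (run : Int) (found : Bool) : Bool :=
  match cs with
  | [] => found || (run == 2)
  | c :: rest =>
    if some c == prev then altLoop rest prev (run + 1) found
    else altLoop rest (some c) 1 (found || (run == 2))

def hasProperDouble_alt (n : Int) : Bool :=
  altLoop (PySem.Int.toStr n).toList none 0 false

-- ===== PRECONDITION & SPEC =====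
-- Pre_ excludes negative n, a corner outside the function's digit-string purpose: A's
-- while-loop never runs there (False), while B's scan of str(n) sees the '-' sign.
def Pre_hasProperDouble (n : Int) : Prop := 0 ≤ n
instance (n : Int) : Decidable (Pre_hasProperDouble n) := by unfold Pre_hasProperDouble; infer_instance
def pvWitness_hasProperDouble : Int := (22)

def Spec_hasProperDouble (n : Int) (out : Bool) : Prop := out = hasProperDouble_alt n
instance (n : Int) (out : Bool) : Decidable (Spec_hasProperDouble n out) := by unfold Spec_hasProperDouble; infer_instance

-- ===== CLAIM (what is proved, stated in full; the proofs are below) =====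
def Claim_equal_hasProperDouble : Prop := ∀ (n : Int), Dom_hasProperDouble n → Pre_hasProperDouble n → Spec_hasProperDouble n (hasProperDouble n)

-- ===== LEMMAS AND PROOFS =====

-- little-endian decimal digits of a natural number
def dle (n : ℕ) : List ℕ :=
  if n = 0 then [] else n % 10 :: dle (n / 10)
termination_by n
decreasing_by exact Nat.div_lt_self (by omega) (by omega)

-- run scanner: current run of p has length r; true iff some maximal run has length two
def scanR {α : Type} [DecidableEq α] : List α → α → ℕ → Bool
  | [], _, r => r == 2
  | c :: t, p, r => if c = p then scanR t p (r + 1) else (r == 2) || scanR t c 1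

def hasTwo {α : Type} [DecidableEq α] : List α → Bool
  | [] => false
  | c :: t => scanR t c 1

-- run lengths, left to right
def goRL {α : Type} [DecidableEq α] : List α → α → ℕ → List ℕ
  | [], _, r => [r]
  | c :: t, p, r => if c = p then goRL t p (r + 1) else r :: goRL t c 1

def rl {α : Type} [DecidableEq α] : List α → List ℕ
  | [] => []
  | c :: t => goRL t c 1

def bumpH : List ℕ → List ℕ
  | [] => []
  | x :: xs => (x + 1) :: xs

def bumpL : List ℕ → List ℕ
  | [] => []
  | [x] => [x + 1]
  | x :: y :: xs => x :: bumpL (y :: xs)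

-- A's loop over an abstract digit list
def aLoop : ℕ → List ℕ → Bool → Bool
  | _, [], _ => false
  | m, d :: t, inT =>
    if m = d then
      if t.isEmpty && !inT then true
      else if m = t.headD 0 then aLoop d t true
      else if !inT then true
      else aLoop d t inT
    else aLoop d t (if inT then false else inT)

theorem scanR_ge3 {α : Type} [DecidableEq α] (cs : List α) :
    ∀ (p : α) (r r' : ℕ), 3 ≤ r → 3 ≤ r' → scanR cs p r = scanR cs p r' := by
  induction cs with
  | nil => intro p r r' hr hr'; simp [scanR]; omega
  | cons c t ih =>
    intro p r r' hr hr'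
    by_cases h : c = p
    · simp [scanR, h]; exact ih p (r+1) (r'+1) (by omega) (by omega)
    · have h1 : (r == 2) = false := by simp; omega
      have h2 : (r' == 2) = false := by simp; omega
      simp only [scanR, if_neg h, h1, h2]

theorem aLoop_cons (m d : ℕ) (t : List ℕ) (inT : Bool) :
    aLoop m (d :: t) inT =
      (if m = d then
        if t.isEmpty && !inT then true
        else if m = t.headD 0 then aLoop d t true
        else if !inT then true
        else aLoop d t inT
      else aLoop d t (if inT then false else inT)) := rfl

theorem aLoop_eq_scanR (ds : List ℕ) :
    ∀ (m : ℕ) (inT : Bool), aLoop m ds inT = scanR ds m (if inT then 3 else 1) := by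
  induction ds with
  | nil => intro m inT; cases inT <;> simp [aLoop, scanR]
  | cons d t ih =>
    intro m inT
    rw [aLoop_cons]
    rw [ih d true, ih d inT, ih d (if inT then false else inT)]
    by_cases hmd : m = d
    · subst hmd
      cases t with
      | nil =>
        cases inT <;> simp [scanR]
      | cons e t' =>
        by_cases hme : m = e
        · subst hme
          cases inT <;>
            simp [scanR, scanR_ge3 t' m 4 3 (by omega) (by omega),
              scanR_ge3 t' m 5 3 (by omega) (by omega)]
        · cases inT <;> simp [scanR, hme, Ne.symm hme]
    · cases inT <;> simp [scanR, hmd, Ne.symm hmd]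

-- ---- arithmetic bridge: hasPDLoop on ↑N equals aLoop on dle N ----
theorem dle_zero : dle 0 = [] := by rw [dle]; simp

theorem dle_pos (n : ℕ) (h : 0 < n) : dle n = n % 10 :: dle (n / 10) := by
  rw [dle]; simp [Nat.pos_iff_ne_zero.mp h]

theorem dle_headD (n : ℕ) : (dle n).headD 0 = n % 10 := by
  rcases Nat.eq_zero_or_pos n with h | h
  · subst h; rw [dle_zero]; simp
  · rw [dle_pos n h]; simp

theorem dle_lt (n : ℕ) : ∀ d ∈ dle n, d < 10 := by
  induction n using Nat.strong_induction_on with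
  | _ n ih =>
    rcases Nat.eq_zero_or_pos n with h | h
    · subst h; rw [dle_zero]; simp
    · rw [dle_pos n h]
      intro d hd
      rcases hd with _ | ⟨_, hd⟩
      · exact Nat.mod_lt _ (by omega)
      · exact ih (n / 10) (Nat.div_lt_self h (by omega)) d hd

theorem pv_fmod10 (N : ℕ) : PySem.Int.mod (N : Int) 10 = ((N % 10 : ℕ) : Int) := by
  show Int.fmod _ _ = _
  have hq : Int.fmod (N : Int) 10 = (N : Int) % 10 := by rw [Int.fmod_eq_emod]; simp
  rw [hq]
  exact_mod_cast rfl

theorem pv_fdiv10 (N : ℕ) : PySem.Int.floordiv (N : Int) 10 = ((N / 10 : ℕ) : Int) := by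
  show Int.fdiv _ _ = _
  have hq : Int.fdiv (N : Int) 10 = (N : Int) / 10 := by rw [Int.fdiv_eq_ediv]; simp
  rw [hq]
  exact_mod_cast rfl

theorem pv_castBeq (a b : ℕ) : ((a : Int) == (b : Int)) = (a == b) := by
  simp

theorem hasPDLoop_eq_aLoop (N : ℕ) :
    ∀ (m : ℕ) (inT : Bool), hasPDLoop (m : Int) (N : Int) inT = aLoop m (dle N) inT := by
  induction N using Nat.strong_induction_on with
  | _ N ih =>
    intro m inT
    rcases Nat.eq_zero_or_pos N with h0 | h0
    · subst h0
      rw [hasPDLoop, dle_zero]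
      simp [aLoop]
    · have hrec := ih (N / 10) (Nat.div_lt_self h0 (by omega))
      have hempty : (dle (N / 10)).isEmpty = decide (N < 10) := by
        rcases Nat.lt_or_ge N 10 with h | h
        · have hq : N / 10 = 0 := Nat.div_eq_of_lt h
          simp [hq, dle_zero, h]
        · have h10 : 0 < N / 10 := Nat.div_pos h (by omega)
          rw [dle_pos _ h10]
          simp
          omega
      rw [hasPDLoop, dle_pos N h0]
      rw [dif_pos (by exact_mod_cast h0)]
      rw [pv_fmod10, pv_fdiv10, pv_fmod10]
      have hlt : (decide ((N : Int) < 10)) = decide (N < 10) := by simp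
      simp only [pv_castBeq, hlt, hrec]
      have hhead : (dle (N / 10)).head?.getD 0 = N / 10 % 10 := by
        simpa using dle_headD (N / 10)
      by_cases hm : m = N % 10 <;>
        by_cases h10 : N < 10 <;>
          by_cases hm2 : m = N / 10 % 10 <;>
            cases inT <;>
              simp_all [aLoop, hhead]

theorem hasProperDouble_eq_hasTwo (n : Int) (hn : 0 ≤ n) :
    hasProperDouble n = hasTwo (dle n.toNat) := by
  obtain ⟨N, rfl⟩ : ∃ N : ℕ, n = (N : Int) := ⟨n.toNat, (Int.toNat_of_nonneg hn).symm⟩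
  rw [hasProperDouble, pv_fmod10, pv_fdiv10, hasPDLoop_eq_aLoop, aLoop_eq_scanR]
  rcases Nat.eq_zero_or_pos N with h0 | h0
  · subst h0
    simp [dle_zero, scanR, hasTwo]
  · rw [Int.toNat_natCast, dle_pos N h0]
    simp [hasTwo]

-- ---- B side: altLoop equals the run scanner ----
theorem pv_natBeqInt (r : ℕ) : ((r : Int) == (2 : Int)) = (r == 2) := by
  by_cases h : r = 2
  · subst h; simp
  · have h2 : ((r : Int)) ≠ 2 := by exact_mod_cast h
    simp [h, h2]

theorem altLoop_eq_scanR (cs : List Char) :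
    ∀ (p : Char) (r : ℕ) (found : Bool),
      altLoop cs (some p) (r : Int) found = (found || scanR cs p r) := by
  induction cs with
  | nil =>
    intro p r found
    simp [altLoop, scanR, pv_natBeqInt]
  | cons c t ih =>
    intro p r found
    by_cases h : c = p
    · subst h
      rw [show altLoop (c :: t) (some c) (r : Int) found
            = altLoop t (some c) ((r : Int) + 1) found by
          rw [altLoop]; rw [if_pos (by simp)]]
      rw [show ((r : Int) + 1) = (((r + 1 : ℕ)) : Int) by push_cast; ring]
      rw [ih, scanR, if_pos rfl]
    · have hne : (some c == some p) = false := by simp [h]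
      rw [show altLoop (c :: t) (some p) (r : Int) found
            = altLoop t (some c) 1 (found || ((r : Int) == 2)) by
          rw [altLoop]; rw [hne]; simp]
      rw [show ((1 : Int)) = (((1 : ℕ)) : Int) by norm_num]
      rw [ih, pv_natBeqInt, scanR, if_neg h]
      cases found <;> cases hr : (r == 2) <;> simp

theorem alt_eq_hasTwo_chars (cs : List Char) :
    altLoop cs none 0 false = hasTwo cs := by
  cases cs with
  | nil => simp [altLoop, hasTwo]
  | cons c t =>
    rw [altLoop]
    rw [if_neg (by simp)]
    have : ((1 : Int)) = ((1 : ℕ) : Int) := by norm_num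
    rw [show (false || ((0 : Int) == 2)) = false by simp, this, altLoop_eq_scanR]
    simp [hasTwo]

-- ---- Nat.toDigits bridge ----
theorem toDigitsCore_eq (f : ℕ) :
    ∀ (n : ℕ) (l : List Char), 0 < n → n < f →
      Nat.toDigitsCore 10 f n l = ((dle n).map Nat.digitChar).reverse ++ l := by
  induction f with
  | zero => intro n l h hf; omega
  | succ f ih =>
    intro n l h hf
    rw [Nat.toDigitsCore]
    by_cases hq : n / 10 = 0
    · simp only [hq, if_true]
      rw [dle_pos n h, hq, dle_zero]
      simp
    · simp only [hq, if_false]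
      rw [ih (n / 10) _ (by omega) (by omega)]
      rw [dle_pos n h]
      simp

theorem toDigits_eq (n : ℕ) (h : 0 < n) :
    Nat.toDigits 10 n = ((dle n).map Nat.digitChar).reverse := by
  rw [Nat.toDigits, toDigitsCore_eq (n + 1) n [] h (by omega)]
  simp

-- ---- run lengths are reversed by list reversal ----
theorem goRL_ne_nil {α : Type} [DecidableEq α] (cs : List α) :
    ∀ (p : α) (r : ℕ), goRL cs p r ≠ [] := by
  induction cs with
  | nil => intro p r; simp [goRL]
  | cons c t ih =>
    intro p r
    by_cases h : c = p <;> simp [goRL, h, ih]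

theorem goRL_succ {α : Type} [DecidableEq α] (cs : List α) :
    ∀ (p : α) (r : ℕ), goRL cs p (r + 1) = bumpH (goRL cs p r) := by
  induction cs with
  | nil => intro p r; simp [goRL, bumpH]
  | cons c t ih =>
    intro p r
    by_cases h : c = p <;> simp [goRL, h, ih, bumpH]

theorem bumpL_cons (x : ℕ) (l : List ℕ) (h : l ≠ []) :
    bumpL (x :: l) = x :: bumpL l := by
  cases l with
  | nil => exact absurd rfl h
  | cons y ys => rfl

theorem bumpL_append (ys : List ℕ) (y : ℕ) :
    bumpL (ys ++ [y]) = ys ++ [y + 1] := by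
  induction ys with
  | nil => rfl
  | cons a t ih =>
    rw [List.cons_append, bumpL_cons a (t ++ [y]) (by simp), ih]
    simp

theorem rev_bumpH (xs : List ℕ) (h : xs ≠ []) :
    (bumpH xs).reverse = bumpL xs.reverse := by
  cases xs with
  | nil => exact absurd rfl h
  | cons x t =>
    simp only [bumpH, List.reverse_cons]
    rw [bumpL_append]

theorem goRL_append {α : Type} [DecidableEq α] (cs : List α) :
    ∀ (p a : α) (r : ℕ), goRL (cs ++ [a]) p r =
      if cs.getLastD p = a then bumpL (goRL cs p r) else goRL cs p r ++ [1] := by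
  induction cs with
  | nil =>
    intro p a r
    by_cases h : p = a
    · simp [goRL, h, bumpL]
    · have h2 : ¬ a = p := fun hc => h hc.symm
      simp [goRL, h, h2]
  | cons c t ih =>
    intro p a r
    have hlast : (c :: t).getLastD p = t.getLastD c := by
      cases t <;> simp [List.getLastD]
    rw [List.cons_append, goRL]
    by_cases h : c = p
    · rw [if_pos h, ih p a (r + 1)]
      subst h
      rw [hlast, goRL]
      rw [if_pos rfl]
    · rw [if_neg h, ih c a 1, hlast]
      by_cases hc : t.getLastD c = a
      · rw [if_pos hc, if_pos hc]
        rw [goRL, if_neg h, bumpL_cons _ _ (goRL_ne_nil t c 1)]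
      · rw [if_neg hc, if_neg hc, goRL, if_neg h]
        simp

theorem rl_reverse {α : Type} [DecidableEq α] (l : List α) :
    rl l.reverse = (rl l).reverse := by
  induction l with
  | nil => rfl
  | cons c cs ih =>
    cases cs with
    | nil => rfl
    | cons e cs' =>
      rw [List.reverse_cons]
      rcases hrev : (e :: cs').reverse with _ | ⟨d, t⟩
      · exact absurd hrev (by simp)
      · have h1 : (d :: t).getLast? = some e := by
          rw [← hrev, List.getLast?_reverse]
          rfl
        have hgl : t.getLastD d = e := by
          have h2 : (d :: t).getLastD d = t.getLastD d := List.getLastD_cons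
          have h3 : (d :: t).getLastD d = ((d :: t).getLast?).getD d := by
            simp [List.getLastD_eq_getLast?]
          rw [← h2, h3, h1]
          rfl
        have hgo : goRL t d 1 = (rl (e :: cs')).reverse := by
          rw [← ih, hrev]
          rfl
        show goRL (t ++ [c]) d 1 = (rl (c :: e :: cs')).reverse
        rw [goRL_append t d c 1, hgl]
        by_cases hec : e = c
        · rw [if_pos hec, hgo]
          show bumpL ((goRL cs' e 1).reverse) = (goRL (e :: cs') c 1).reverse
          rw [← hec]
          rw [show goRL (e :: cs') e 1 = bumpH (goRL cs' e 1) by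
            rw [goRL]; rw [if_pos rfl]; exact goRL_succ cs' e 1]
          rw [rev_bumpH _ (goRL_ne_nil cs' e 1)]
        · rw [if_neg hec, hgo]
          show (goRL cs' e 1).reverse ++ [1] = (goRL (e :: cs') c 1).reverse
          rw [show goRL (e :: cs') c 1 = 1 :: goRL cs' e 1 by
            rw [goRL]; rw [if_neg hec]]
          simp

theorem pv_beq_decide (r : ℕ) : (r == 2) = decide (r = 2) := by
  by_cases h : r = 2 <;> simp [h]

theorem scanR_eq_contains {α : Type} [DecidableEq α] (cs : List α) :
    ∀ (p : α) (r : ℕ), scanR cs p r = (goRL cs p r).contains 2 := by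
  induction cs with
  | nil => intro p r; simp [scanR, goRL, eq_comm, pv_beq_decide]
  | cons c t ih =>
    intro p r
    by_cases h : c = p <;> simp [scanR, goRL, h, ih, eq_comm, pv_beq_decide]

theorem hasTwo_eq_contains {α : Type} [DecidableEq α] (l : List α) :
    hasTwo l = (rl l).contains 2 := by
  cases l with
  | nil => rfl
  | cons c t => exact scanR_eq_contains t c 1

theorem hasTwo_reverse {α : Type} [DecidableEq α] (l : List α) :
    hasTwo l.reverse = hasTwo l := by
  rw [hasTwo_eq_contains, hasTwo_eq_contains, rl_reverse]
  simp

-- digitChar is injective below 10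
theorem digitChar_inj (a b : ℕ) (ha : a < 10) (hb : b < 10)
    (h : Nat.digitChar a = Nat.digitChar b) : a = b := by
  interval_cases a <;> interval_cases b <;> revert h <;> decide

theorem scanR_map (l : List ℕ) :
    ∀ (p : ℕ) (r : ℕ), (∀ d ∈ p :: l, d < 10) →
      scanR (l.map Nat.digitChar) (Nat.digitChar p) r = scanR l p r := by
  induction l with
  | nil => intro p r _; simp [scanR]
  | cons c t ih =>
    intro p r hlt
    have hc : c < 10 := hlt c (by simp)
    have hp : p < 10 := hlt p (by simp)
    by_cases h : c = p
    · subst h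
      simp only [List.map_cons, scanR]
      exact ih c (r + 1) (fun d hd => hlt d (by simp at hd ⊢; tauto))
    · have hne : Nat.digitChar c ≠ Nat.digitChar p := fun hc' => h (digitChar_inj c p hc hp hc')
      simp only [List.map_cons, scanR, if_neg h, if_neg hne]
      rw [ih c 1 (fun d hd => hlt d (by simp at hd ⊢; tauto))]

theorem hasTwo_map (l : List ℕ) (hlt : ∀ d ∈ l, d < 10) :
    hasTwo (l.map Nat.digitChar) = hasTwo l := by
  cases l with
  | nil => rfl
  | cons c t =>
    simp only [List.map_cons, hasTwo]
    exact scanR_map t c 1 (fun d hd => hlt d (by simp at hd ⊢; tauto))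

theorem alt_eq_hasTwo (n : Int) (hn : 0 ≤ n) :
    hasProperDouble_alt n = hasTwo (dle n.toNat) := by
  rw [hasProperDouble_alt]
  have htl : (PySem.Int.toStr n).toList = PySem.Int.toChars n := PySem.Int.toList_toStr n
  rw [htl]
  rw [show PySem.Int.toChars n = Nat.toDigits 10 n.toNat by
    rw [PySem.Int.toChars]; rw [if_neg (by omega)]]
  rw [alt_eq_hasTwo_chars]
  rcases Nat.eq_zero_or_pos n.toNat with h0 | h0
  · rw [h0, dle_zero]
    have : Nat.toDigits 10 0 = ['0'] := rfl
    rw [this]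
    rfl
  · rw [toDigits_eq n.toNat h0, ← List.map_reverse, hasTwo_map _ (by
      intro d hd
      exact dle_lt n.toNat d (List.mem_reverse.mp hd)), hasTwo_reverse]

-- ===== VERDICT (by name: the statement is the Claim_ definition above) =====
theorem hasProperDouble_spec : Claim_equal_hasProperDouble := by
  intro n _ hpre
  unfold Spec_hasProperDouble
  rw [hasProperDouble_eq_hasTwo n hpre, alt_eq_hasTwo n hpre]
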